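-- pv_equiv track=rewrite | github.com/tomoriolu/IA02_project | dodo_mc.py | set_grid
-- ===== SOURCE A (Python) =====
-- Grid = list[list[int]]
--
-- def set_grid(grid: Grid) -> Grid:
--     "initialise un grid pour un début de partie"
--     n: int = len(grid) // 2
--     for i in range(n + 2):
--         for j in range(n + i - 1, n * 2 + 1):
--             if grid[i][j] != -1:
--                 grid[i][j] = 2
--     for i in range(n, len(grid)):
--         for j in range(0, i - n + 2):
--             if grid[i][j] != -1:
--                 grid[i][j] = 1
--     return grid
-- ===== SOURCE B (Python) =====
-- def set_grid(grid):
--     "initialise un grid pour un début de partie"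
--     n = len(grid) // 2
--     for i in range(len(grid)):
--         row = grid[i]
--         width = 2 * n + 1 if i < n + 2 else i - n + 2
--         for j in range(width):
--             v = row[j]
--             if v == -1:
--                 continue
--             if i >= n and j <= i - n + 1:
--                 row[j] = 1
--             elif i < n + 2 and n + i - 1 <= j <= 2 * n:
--                 row[j] = 2
--     return grid
-- ===== Notes on version B (the rewrite author's own statement) =====
-- stated objective: alternative
-- what changed: B replaces A's two region-bounded nested loop nests (which enumerate only the cells of each triangular region and write the overlap twice) by a single row-major scan that walks each row once across the columns the regions reach and decides each visited cell's mark once from closed-form region-membership inequalities (player-1 tested first, since A's second pass overwrites the overlap).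
import Mathlib
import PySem

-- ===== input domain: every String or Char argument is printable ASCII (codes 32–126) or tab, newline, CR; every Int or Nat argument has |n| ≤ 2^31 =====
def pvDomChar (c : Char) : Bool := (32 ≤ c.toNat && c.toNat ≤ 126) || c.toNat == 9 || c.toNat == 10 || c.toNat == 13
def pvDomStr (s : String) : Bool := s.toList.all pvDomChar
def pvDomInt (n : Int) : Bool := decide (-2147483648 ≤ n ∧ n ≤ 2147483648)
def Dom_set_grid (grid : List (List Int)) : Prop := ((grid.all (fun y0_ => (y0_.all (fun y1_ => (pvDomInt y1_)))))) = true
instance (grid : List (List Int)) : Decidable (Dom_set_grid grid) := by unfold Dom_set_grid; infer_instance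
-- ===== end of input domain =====

-- B replaces A's two region-bounded nested loop nests by a single row-major
-- scan that walks each row once across the columns the regions reach, deciding
-- each visited cell's mark from closed-form region-membership inequalities
-- (player-1 tested first, since A's second pass overwrites the overlap);
-- objective: alternative. Both Pythons mutate the grid argument in place; the
-- theorems below are about the returned value.

-- ===== PORT A =====
-- `.toNat` on the indices and `getD` are exact on Pre_: there all visited indices are
-- nonnegative and in range (Pre_ excludes exactly the inputs where Python A raises
-- IndexError or would wrap a negative index).
def set_grid (grid : List (List Int)) : List (List Int) :=
  let n : Int := PySem.Int.floordiv (grid.length : Int) 2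
  let g1 := (PySem.List.pyRange 0 (n + 2) 1).foldl (fun g i =>
    (PySem.List.pyRange (n + i - 1) (n * 2 + 1) 1).foldl (fun g j =>
      if (g.getD i.toNat []).getD j.toNat 0 ≠ -1 then
        g.set i.toNat ((g.getD i.toNat []).set j.toNat 2)
      else g) g) grid
  (PySem.List.pyRange n (grid.length : Int) 1).foldl (fun g i =>
    (PySem.List.pyRange 0 (i - n + 2) 1).foldl (fun g j =>
      if (g.getD i.toNat []).getD j.toNat 0 ≠ -1 then
        g.set i.toNat ((g.getD i.toNat []).set j.toNat 1)
      else g) g) g1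

-- ===== PORT B =====
-- B-side helper: the body of B's inner loop (one cell); `v = row[j]` is `r.getD j 0`,
-- exact on Pre_ where j < len(row) (outside Pre_ Python B raises IndexError there);
-- `row[j] = …` is `r.set j …` (the mutation modeled on the returned value).
def markStep (n i : Int) (r : List Int) (j : Nat) : List Int :=
  let v := r.getD j 0
  if v = -1 then r
  else if n ≤ i ∧ (j : Int) ≤ i - n + 1 then r.set j 1
  else if i < n + 2 ∧ n + i - 1 ≤ (j : Int) ∧ (j : Int) ≤ 2 * n then r.set j 2
  else r

-- B's inner loop: `width = 2*n+1 if i < n+2 else i-n+2; for j in range(width):`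
def markRow (n i : Int) (row : List Int) : List Int :=
  (List.range (if i < n + 2 then 2 * n + 1 else i - n + 2 : Int).toNat).foldl (markStep n i) row

def set_grid_alt (grid : List (List Int)) : List (List Int) :=
  let n : Int := PySem.Int.floordiv (grid.length : Int) 2
  (List.range grid.length).foldl (fun g i => g.set i (markRow n (i : Int) (g.getD i []))) grid

-- ===== PRECONDITION & SPEC =====
-- Pre_: exactly the inputs on which Python A returns normally: at least 3 rows, the
-- first n+2 rows long enough for the player-2 region, rows from n on long enough for
-- the player-1 region; elsewhere A raises IndexError (or wraps a negative index and
-- then raises on a later row).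
def Pre_set_grid (grid : List (List Int)) : Prop :=
  3 ≤ grid.length ∧
  (∀ i : Nat, i < grid.length / 2 + 2 → 2 * (grid.length / 2) + 1 ≤ (grid.getD i []).length) ∧
  (∀ i : Nat, i < grid.length → grid.length / 2 ≤ i → i - grid.length / 2 + 2 ≤ (grid.getD i []).length)
instance (grid : List (List Int)) : Decidable (Pre_set_grid grid) := by unfold Pre_set_grid; infer_instance
def pvWitness_set_grid : List (List Int) :=
  [[0, -1, 0], [0, 0, 0], [-1, 0, 0]]

def Spec_set_grid (grid : List (List Int)) (out : List (List Int)) : Prop := out = set_grid_alt grid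
instance (grid : List (List Int)) (out : List (List Int)) : Decidable (Spec_set_grid grid out) := by unfold Spec_set_grid; infer_instance

-- ===== CLAIM (what is proved, stated in full; the proofs are below) =====
def Claim_equal_set_grid : Prop := ∀ (grid : List (List Int)), Dom_set_grid grid → Pre_set_grid grid → Spec_set_grid grid (set_grid grid)

-- ===== LEMMAS AND PROOFS =====

-- ---- A-side characterization ----

def rowStep (v : Int) (row : List Int) (j : Int) : List Int :=
  if row.getD j.toNat 0 ≠ -1 then row.set j.toNat v else row

def rowFoldL (v : Int) (js : List Int) (row : List Int) : List Int := js.foldl (rowStep v) row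

theorem rowFoldL_nil_row (v : Int) (js : List Int) : rowFoldL v js [] = [] := by
  induction js with
  | nil => rfl
  | cons j js ih => simpa [rowFoldL, rowStep, List.getD] using ih

theorem getD_set_self (g : List (List Int)) (i : Nat) (r : List Int) (h : i < g.length) :
    (g.set i r).getD i [] = r := by
  simp [List.getD_eq_getElem?_getD, List.getElem?_set_self (by simpa using h)]

theorem inner_eq (v : Int) (i : Nat) (js : List Int) (g : List (List Int)) :
    js.foldl (fun g j => if (g.getD i []).getD j.toNat 0 ≠ -1 then
        g.set i ((g.getD i []).set j.toNat v) else g) g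
    = g.set i (rowFoldL v js (g.getD i [])) := by
  induction js generalizing g with
  | nil =>
    simp only [List.foldl_nil, rowFoldL]
    by_cases h : i < g.length
    · simp [List.getD_eq_getElem?_getD, List.getElem?_eq_getElem h, List.set_getElem_self]
    · rw [List.set_eq_of_length_le (by omega)]
  | cons j js ih =>
    simp only [List.foldl_cons]
    by_cases h : i < g.length
    · have hrow : (g.set i ((g.getD i []).set j.toNat v)).getD i [] = (g.getD i []).set j.toNat v :=
        getD_set_self _ _ _ h
      by_cases hc : (g.getD i []).getD j.toNat 0 ≠ -1
      · rw [if_pos hc, ih, hrow, List.set_set]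
        have hstep : rowStep v (g.getD i []) j = (g.getD i []).set j.toNat v := by
          rw [rowStep, if_pos hc]
        rw [show rowFoldL v (j :: js) (g.getD i []) = rowFoldL v js (rowStep v (g.getD i []) j) from rfl,
          hstep]
      · rw [if_neg hc, ih]
        have hstep : rowStep v (g.getD i []) j = g.getD i [] := by
          rw [rowStep, if_neg hc]
        rw [show rowFoldL v (j :: js) (g.getD i []) = rowFoldL v js (rowStep v (g.getD i []) j) from rfl,
          hstep]
    · have hg : g.getD i [] = [] := by
        simp [List.getD_eq_getElem?_getD, List.getElem?_eq_none (show g.length ≤ i by omega)]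
      have hset : ∀ r : List Int, g.set i r = g := fun r => List.set_eq_of_length_le (by omega)
      rw [hg, rowFoldL_nil_row, hset]
      rw [if_pos (by simp [List.getD] : ([] : List Int).getD j.toNat 0 ≠ -1)]
      rw [ih, hg, rowFoldL_nil_row]

theorem rowFold_char (v : Int) (lo hi : Int) (hlo : 0 ≤ lo) (row : List Int) (k : Nat) :
    (rowFoldL v (PySem.List.pyRange lo hi 1) row)[k]? =
      row[k]?.map (fun x => if lo ≤ (k : Int) ∧ (k : Int) < hi ∧ x ≠ -1 then v else x) := by
  induction hm : (hi - lo).toNat generalizing lo row with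
  | zero =>
    rw [PySem.List.pyRange_one_eq_nil (by omega)]
    cases hr : row[k]? with
    | none => simp only [rowFoldL, List.foldl_nil, hr, Option.map_none]
    | some x =>
      simp only [rowFoldL, List.foldl_nil, hr, Option.map_some]
      rw [if_neg (by omega : ¬(lo ≤ (k:Int) ∧ (k:Int) < hi ∧ x ≠ -1))]
  | succ m ih =>
    have hlt : lo < hi := by omega
    rw [PySem.List.pyRange_one_cons hlt]
    have hcons : rowFoldL v (lo :: PySem.List.pyRange (lo+1) hi 1) row
        = rowFoldL v (PySem.List.pyRange (lo+1) hi 1) (rowStep v row lo) := rfl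
    rw [hcons, ih (lo+1) (by omega) (rowStep v row lo) (by omega)]
    have hL : ((lo.toNat : Int)) = lo := Int.toNat_of_nonneg hlo
    by_cases hk : k = lo.toNat
    · subst hk
      cases hr : row[lo.toNat]? with
      | none =>
        have hlen : row.length ≤ lo.toNat := List.getElem?_eq_none_iff.mp hr
        have hstep : rowStep v row lo = row := by
          rw [rowStep]; split
          · exact List.set_eq_of_length_le hlen
          · rfl
        simp [hstep, hr]
      | some x =>
        have hklen : lo.toNat < row.length := by
          by_contra hc
          rw [List.getElem?_eq_none (by omega)] at hr; cases hr
        have hgetD : row.getD lo.toNat 0 = x := by simp [List.getD_eq_getElem?_getD, hr]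
        by_cases hx : x = -1
        · have hstep : rowStep v row lo = row := by rw [rowStep, hgetD]; simp [hx]
          rw [hstep]
          simp only [hr, Option.map_some]
          split_ifs <;> first | rfl | omega
        · have hstep : rowStep v row lo = row.set lo.toNat v := by rw [rowStep, hgetD]; simp [hx]
          rw [hstep, List.getElem?_set_self hklen]
          simp only [Option.map_some]
          split_ifs <;> first | rfl | omega
    · have hkk : (k : Int) ≠ lo := by omega
      have hstepk : (rowStep v row lo)[k]? = row[k]? := by
        rw [rowStep]
        split
        · exact List.getElem?_set_ne (by omega)
        · rfl
      rw [hstepk]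
      cases hr : row[k]? with
      | none => rfl
      | some x =>
        simp only [Option.map_some]
        split_ifs <;> first | rfl | omega

theorem outer_char (f : Int → List Int → List Int) (lo hi : Int) (hlo : 0 ≤ lo)
    (g : List (List Int)) (a : Nat) :
    ((PySem.List.pyRange lo hi 1).foldl (fun g i => g.set i.toNat (f i (g.getD i.toNat []))) g)[a]? =
      g[a]?.map (fun row => if lo ≤ (a : Int) ∧ (a : Int) < hi then f (a : Int) row else row) := by
  induction hm : (hi - lo).toNat generalizing lo g with
  | zero =>
    rw [PySem.List.pyRange_one_eq_nil (by omega)]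
    cases hr : g[a]? with
    | none => simp [hr]
    | some row => simp only [List.foldl_nil, hr, Option.map_some]; rw [if_neg (by omega)]
  | succ m ih =>
    have hlt : lo < hi := by omega
    rw [PySem.List.pyRange_one_cons hlt, List.foldl_cons,
      ih (lo+1) (by omega) _ (by omega)]
    by_cases hk : a = lo.toNat
    · subst hk
      cases hr : g[lo.toNat]? with
      | none =>
        have hlen : g.length ≤ lo.toNat := List.getElem?_eq_none_iff.mp hr
        rw [List.set_eq_of_length_le (by omega)]
        simp [hr]
      | some row =>
        have hklen : lo.toNat < g.length := by
          by_contra hc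
          rw [List.getElem?_eq_none (by omega)] at hr; cases hr
        have hgetD : g.getD lo.toNat [] = row := by simp [List.getD_eq_getElem?_getD, hr]
        rw [hgetD, List.getElem?_set_self hklen]
        simp only [Option.map_some]
        rw [if_neg (by omega), if_pos ⟨by omega, by omega⟩]
        have : ((lo.toNat : Nat) : Int) = lo := Int.toNat_of_nonneg hlo
        rw [this]
    · have hne : lo.toNat ≠ a := fun h => hk h.symm
      rw [List.getElem?_set_ne hne]
      cases hr : g[a]? with
      | none => rfl
      | some row =>
        simp only [Option.map_some]
        have hkk : (a : Int) ≠ lo := by omega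
        by_cases hc : lo + 1 ≤ (a:Int) ∧ (a:Int) < hi
        · rw [if_pos hc, if_pos ⟨by omega, hc.2⟩]
        · rw [if_neg hc, if_neg (by omega)]

-- ---- B-side characterization ----

-- the per-cell value B's scan assigns
def markVal (n i : Int) (k : Nat) (v : Int) : Int :=
  if v = -1 then v
  else if n ≤ i ∧ (k : Int) ≤ i - n + 1 then 1
  else if i < n + 2 ∧ n + i - 1 ≤ (k : Int) ∧ (k : Int) ≤ 2 * n then 2
  else v

theorem markStep_ne (n i : Int) (r : List Int) (j k : Nat) (h : k ≠ j) :
    (markStep n i r j)[k]? = r[k]? := by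
  rw [markStep]
  split
  · rfl
  · split
    · exact List.getElem?_set_ne (fun hh => h hh.symm)
    · split
      · exact List.getElem?_set_ne (fun hh => h hh.symm)
      · rfl

theorem markStep_self (n i : Int) (r : List Int) (j : Nat) :
    (markStep n i r j)[j]? = r[j]?.map (markVal n i j) := by
  cases hr : r[j]? with
  | none =>
    have hlen : r.length ≤ j := List.getElem?_eq_none_iff.mp hr
    have hid : ∀ w : Int, r.set j w = r := fun w => List.set_eq_of_length_le hlen
    rw [markStep]
    simp only [hid]
    split <;> [skip; split <;> [skip; split]] <;> simp [hr]
  | some v =>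
    have hjlen : j < r.length := by
      by_contra hc
      rw [List.getElem?_eq_none (by omega)] at hr; cases hr
    have hgd : r.getD j 0 = v := by simp [List.getD_eq_getElem?_getD, hr]
    rw [markStep, hgd]
    simp only [Option.map_some, markVal]
    by_cases h1 : v = -1
    · simp [h1, hr]
    · rw [if_neg h1, if_neg h1]
      by_cases h2 : n ≤ i ∧ (j : Int) ≤ i - n + 1
      · rw [if_pos h2, if_pos h2, List.getElem?_set_self hjlen]
      · rw [if_neg h2, if_neg h2]
        by_cases h3 : i < n + 2 ∧ n + i - 1 ≤ (j : Int) ∧ (j : Int) ≤ 2 * n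
        · rw [if_pos h3, if_pos h3, List.getElem?_set_self hjlen]
        · rw [if_neg h3, if_neg h3, hr]

theorem foldMark_char (n i : Int) (js : List Nat) (hnd : js.Nodup) (row : List Int) (k : Nat) :
    (js.foldl (markStep n i) row)[k]? =
      if k ∈ js then row[k]?.map (markVal n i k) else row[k]? := by
  induction js generalizing row with
  | nil => simp
  | cons j js ih =>
    rw [List.nodup_cons] at hnd
    rw [List.foldl_cons, ih hnd.2]
    by_cases hmem : k ∈ js
    · rw [if_pos hmem, if_pos (List.mem_cons_of_mem _ hmem),
        markStep_ne n i row j k (fun h => hnd.1 (h ▸ hmem))]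
    · rw [if_neg hmem]
      by_cases hkj : k = j
      · subst hkj
        rw [if_pos List.mem_cons_self, markStep_self]
      · rw [if_neg (by simp [hkj, hmem]), markStep_ne n i row j k hkj]

theorem markRow_char (n i : Int) (row : List Int) (k : Nat) :
    (markRow n i row)[k]? =
      if (k : Int) < (if i < n + 2 then 2 * n + 1 else i - n + 2) then
        row[k]?.map (markVal n i k)
      else row[k]? := by
  rw [markRow, foldMark_char n i _ (List.nodup_range) row k]
  by_cases hni : i < n + 2
  · simp only [if_pos hni, List.mem_range]
    split_ifs <;> first | rfl | omega
  · simp only [if_neg hni, List.mem_range]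
    split_ifs <;> first | rfl | omega

theorem len_outerB (f : Nat → List Int → List Int) (js : List Nat) (g : List (List Int)) :
    (js.foldl (fun g i => g.set i (f i (g.getD i []))) g).length = g.length := by
  induction js generalizing g with
  | nil => rfl
  | cons j js ih => rw [List.foldl_cons, ih, List.length_set]

theorem outerB_char (f : Nat → List Int → List Int) (m : Nat) (g : List (List Int)) (a : Nat) :
    ((List.range m).foldl (fun g i => g.set i (f i (g.getD i []))) g)[a]? =
      g[a]?.map (fun row => if a < m then f a row else row) := by
  induction m generalizing a with
  | zero =>
    cases hr : g[a]? with
    | none => simp [hr]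
    | some row => simp [hr]
  | succ m ih =>
    rw [List.range_succ, List.foldl_append, List.foldl_cons, List.foldl_nil]
    have hlen : ((List.range m).foldl (fun g i => g.set i (f i (g.getD i []))) g).length
        = g.length := len_outerB f _ g
    have hGm : ((List.range m).foldl (fun g i => g.set i (f i (g.getD i []))) g)[m]? = g[m]? := by
      rw [ih m]
      cases hr : g[m]? with
      | none => rfl
      | some row => simp
    by_cases ha : a = m
    · subst ha
      by_cases h : a < g.length
      · rw [List.getElem?_set_self (by omega)]
        have hgd : ((List.range a).foldl (fun g i => g.set i (f i (g.getD i []))) g).getD a []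
            = g.getD a [] := by
          rw [List.getD_eq_getElem?_getD, hGm, List.getD_eq_getElem?_getD]
        rw [hgd, List.getD_eq_getElem?_getD, List.getElem?_eq_getElem h]
        simp
      · rw [List.set_eq_of_length_le (by omega), hGm,
          List.getElem?_eq_none (by omega)]
        rfl
    · rw [List.getElem?_set_ne (fun h => ha h.symm), ih a]
      cases hr : g[a]? with
      | none => rfl
      | some row =>
        simp only [Option.map_some]
        by_cases hc : a < m
        · rw [if_pos hc, if_pos (by omega)]
        · rw [if_neg hc, if_neg (by omega)]

-- ---- main equality ----

theorem set_grid_eq (grid : List (List Int)) (h3 : 3 ≤ grid.length) :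
    set_grid grid = set_grid_alt grid := by
  have hfd : PySem.Int.floordiv (grid.length : Int) 2 = (grid.length : Int) / 2 :=
    PySem.Int.floordiv_eq_ediv_of_pos (by norm_num)
  simp only [set_grid, set_grid_alt, hfd]
  have hn1 : 1 ≤ (grid.length : Int) / 2 := by omega
  generalize hN : (grid.length : Int) / 2 = n at *
  have h1 : (fun (g : List (List Int)) (i : Int) =>
      (PySem.List.pyRange (n + i - 1) (n * 2 + 1) 1).foldl (fun g j =>
        if (g.getD i.toNat []).getD j.toNat 0 ≠ -1 then
          g.set i.toNat ((g.getD i.toNat []).set j.toNat 2) else g) g)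
      = (fun g i => g.set i.toNat
          (rowFoldL 2 (PySem.List.pyRange (n + i - 1) (n * 2 + 1) 1) (g.getD i.toNat []))) :=
    funext fun g => funext fun i => inner_eq 2 i.toNat _ g
  have h2 : (fun (g : List (List Int)) (i : Int) =>
      (PySem.List.pyRange 0 (i - n + 2) 1).foldl (fun g j =>
        if (g.getD i.toNat []).getD j.toNat 0 ≠ -1 then
          g.set i.toNat ((g.getD i.toNat []).set j.toNat 1) else g) g)
      = (fun g i => g.set i.toNat
          (rowFoldL 1 (PySem.List.pyRange 0 (i - n + 2) 1) (g.getD i.toNat []))) :=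
    funext fun g => funext fun i => inner_eq 1 i.toNat _ g
  rw [h1, h2]
  apply List.ext_getElem?
  intro a
  rw [outer_char (fun i row => rowFoldL 1 (PySem.List.pyRange 0 (i - n + 2) 1) row) n _ (by omega),
    outer_char (fun i row => rowFoldL 2 (PySem.List.pyRange (n + i - 1) (n * 2 + 1) 1) row) 0 _ (by omega),
    outerB_char (fun i row => markRow n (i : Int) row) grid.length grid a]
  by_cases ha : a < grid.length
  · have hai : (a : Int) < (grid.length : Int) := by exact_mod_cast ha
    rw [List.getElem?_eq_getElem ha]
    simp only [Option.map_some, if_pos ha]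
    congr 1
    apply List.ext_getElem?
    intro k
    rw [markRow_char]
    by_cases c2 : 0 ≤ (a : Int) ∧ (a : Int) < n + 2
    · have hw : (if (a : Int) < n + 2 then 2 * n + 1 else (a : Int) - n + 2) = 2 * n + 1 :=
        if_pos c2.2
      rw [hw]
      by_cases c1 : n ≤ (a : Int) ∧ (a : Int) < (grid.length : Int)
      · rw [if_pos c2, if_pos c1,
          rowFold_char 1 0 _ (by omega),
          rowFold_char 2 (n + (a : Int) - 1) _ (by omega), Option.map_map]
        cases grid[a][k]? with
        | none => simp
        | some x =>
          simp only [Option.map_some, Function.comp, markVal]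
          split_ifs <;> first | rfl | omega
      · rw [if_pos c2, if_neg c1, rowFold_char 2 (n + (a : Int) - 1) _ (by omega)]
        cases grid[a][k]? with
        | none => simp
        | some x =>
          simp only [Option.map_some, markVal]
          split_ifs <;> first | rfl | omega
    · have hw : (if (a : Int) < n + 2 then 2 * n + 1 else (a : Int) - n + 2) = (a : Int) - n + 2 :=
        if_neg (by omega)
      rw [hw]
      by_cases c1 : n ≤ (a : Int) ∧ (a : Int) < (grid.length : Int)
      · rw [if_neg c2, if_pos c1, rowFold_char 1 0 _ (by omega)]
        cases grid[a][k]? with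
        | none => simp
        | some x =>
          simp only [Option.map_some, markVal]
          split_ifs <;> first | rfl | omega
      · exfalso; omega
  · rw [List.getElem?_eq_none (by omega)]
    rfl

-- ===== VERDICT (by name: the statement is the Claim_ definition above) =====
theorem set_grid_spec : Claim_equal_set_grid := by
  intro grid _ hpre
  exact set_grid_eq grid hpre.1
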